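-- pv_equiv track=rewrite | github.com/Damiendb1/syntra_start | bestanden Arvid/Arvid module 1 lesmateriaal/yahtzee.py | three_of_kind
-- ===== SOURCE A (Python) =====
-- def three_of_kind(dice: list) -> int:
--     """
--     :param dice:
--     :return: sum of dice if there are at least 3 equal dice, else 0
--     """
--     # TODO: three_of_kind / four_of_kind kunnen herwerkt worden tot 1 function
--     d = {}
--     for die in dice:
--         d[die] = d.get(die, 0) + 1
--
--     for v in d.values():
--         if v >= 3:
--             return sum(dice)
--     return 0
-- ===== SOURCE B (Python) =====
-- def three_of_kind(dice: list) -> int: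
--     """Sum of dice if at least 3 equal dice, else 0: single run-length scan of the sorted list."""
--     run = 0
--     prev = None
--     for x in sorted(dice):
--         run = run + 1 if x == prev else 1
--         prev = x
--         if run >= 3:
--             return sum(dice)
--     return 0
-- ===== Notes on version B (the rewrite author's own statement) =====
-- stated objective: alternative
-- what changed: Replaced the frequency-dict build plus value scan with a single run-length scan over sorted(dice) that returns sum(dice) as soon as three consecutive equal values are seen.
import Mathlib
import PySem

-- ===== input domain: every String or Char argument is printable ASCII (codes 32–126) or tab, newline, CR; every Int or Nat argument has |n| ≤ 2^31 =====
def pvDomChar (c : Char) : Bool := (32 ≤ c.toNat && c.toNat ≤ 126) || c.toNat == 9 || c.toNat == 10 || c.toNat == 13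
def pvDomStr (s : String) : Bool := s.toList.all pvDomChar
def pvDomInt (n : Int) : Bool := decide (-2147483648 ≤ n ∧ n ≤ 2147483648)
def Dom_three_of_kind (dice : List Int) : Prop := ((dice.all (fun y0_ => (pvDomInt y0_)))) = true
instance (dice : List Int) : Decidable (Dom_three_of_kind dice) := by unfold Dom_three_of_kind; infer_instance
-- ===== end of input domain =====

-- B replaces A's frequency-dict + value scan by a single run-length scan of the sorted list (alternative algorithm, same result).


-- ===== PORT A =====
-- the second loop of A: scan d.values(), early-return sum(dice) on the first v ≥ 3
def tokScanVals (vals : List Int) (dice : List Int) : Int :=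
  match vals with
  | [] => 0
  | v :: vs => if 3 ≤ v then dice.sum else tokScanVals vs dice

def three_of_kind (dice : List Int) : Int :=
  let d := dice.foldl (fun d die => d.insert die (d.getD die 0 + 1)) PySem.Dict.empty
  tokScanVals d.values dice

-- ===== PORT B =====
-- run-length scan over the sorted list; prev = None at the start
def tokRunScan (prev : Option Int) (run : Nat) (s : List Int) (dice : List Int) : Int :=
  match s with
  | [] => 0
  | x :: xs =>
    let r := if some x = prev then run + 1 else 1
    if 3 ≤ r then dice.sum else tokRunScan (some x) r xs dice

def three_of_kind_alt (dice : List Int) : Int :=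
  tokRunScan none 0 (PySem.List.sorted dice (fun x => x) false) dice

-- ===== PRECONDITION & SPEC =====
def Spec_three_of_kind (dice : List Int) (out : Int) : Prop := out = three_of_kind_alt dice
instance (dice : List Int) (out : Int) : Decidable (Spec_three_of_kind dice out) := by unfold Spec_three_of_kind; infer_instance

-- ===== CLAIM (what is proved, stated in full; the proofs are below) =====
def Claim_equal_three_of_kind : Prop := ∀ (dice : List Int), Dom_three_of_kind dice → Spec_three_of_kind dice (three_of_kind dice)

-- ===== LEMMAS AND PROOFS =====

theorem tokScanVals_eq (vals dice : List Int) :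
    tokScanVals vals dice = if ∃ v ∈ vals, 3 ≤ v then dice.sum else 0 := by
  induction vals with
  | nil => simp [tokScanVals]
  | cons v vs ih =>
    simp only [tokScanVals, ih]
    by_cases h : 3 ≤ v
    · simp [h]
    · simp [h]

theorem getD_fold_insert (l : List Int) (d : PySem.Dict Int Int) (v : Int) :
    (l.foldl (fun d die => d.insert die (d.getD die 0 + 1)) d).getD v 0
      = d.getD v 0 + l.count v := by
  induction l generalizing d with
  | nil => simp
  | cons x xs ih =>
    simp only [List.foldl_cons, ih, PySem.Dict.getD_insert, List.count_cons]
    by_cases h : v = x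
    · subst h
      simp; omega
    · have h' : ¬ x = v := fun hxv => h hxv.symm
      simp [h, h']

theorem mem_keys_fold_insert (l : List Int) (d : PySem.Dict Int Int) (k : Int) :
    k ∈ (l.foldl (fun d die => d.insert die (d.getD die 0 + 1)) d).keys ↔ k ∈ d.keys ∨ k ∈ l := by
  induction l generalizing d with
  | nil => simp
  | cons x xs ih =>
    simp only [List.foldl_cons, ih, PySem.Dict.mem_keys_insert, List.mem_cons]
    tauto

-- A's result, characterised: sum(dice) iff some die occurs ≥ 3 times
theorem three_of_kind_eq (dice : List Int) :
    three_of_kind dice = if ∃ x ∈ dice, 3 ≤ dice.count x then dice.sum else 0 := by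
  unfold three_of_kind
  simp only [tokScanVals_eq]
  have hnd : (dice.foldl (fun (d : PySem.Dict Int Int) die => d.insert die (d.getD die 0 + 1)) PySem.Dict.empty).keys.Nodup :=
    PySem.Dict.nodup_keys_foldl_insert dice _ PySem.Dict.empty PySem.Dict.nodup_keys_empty
  have hkey : (∃ v ∈ (dice.foldl (fun (d : PySem.Dict Int Int) die => d.insert die (d.getD die 0 + 1)) PySem.Dict.empty).values, 3 ≤ v)
      ↔ ∃ x ∈ dice, 3 ≤ dice.count x := by
    rw [PySem.Dict.values_eq_map_keys _ hnd 0]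
    simp only [List.mem_map]
    constructor
    · rintro ⟨v, ⟨k, hk, rfl⟩, h3⟩
      rw [getD_fold_insert] at h3
      have hmem : k ∈ dice := by
        have := (mem_keys_fold_insert dice PySem.Dict.empty k).1 hk
        simpa using this
      exact ⟨k, hmem, by simpa using h3⟩
    · rintro ⟨x, hx, h3⟩
      refine ⟨_, ⟨x, (mem_keys_fold_insert dice PySem.Dict.empty x).2 (Or.inr hx), rfl⟩, ?_⟩
      rw [getD_fold_insert]
      simpa using h3
  simp only [hkey]

-- B's scan from (some p, run) on a sorted tail whose elements all dominate p
theorem tokRunScan_some (dice : List Int) (l : List Int) (p : Int) (run : Nat)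
    (hs : l.Pairwise (· ≤ ·)) (hge : ∀ y ∈ l, p ≤ y) (hr : run < 3) :
    tokRunScan (some p) run l dice
      = if 3 ≤ run + l.count p ∨ ∃ x ∈ l, p < x ∧ 3 ≤ l.count x then dice.sum else 0 := by
  induction l generalizing p run with
  | nil =>
    have hno : ¬ (3 ≤ run + List.count p [] ∨ ∃ x ∈ ([] : List Int), p < x ∧ 3 ≤ List.count x []) := by
      simp; omega
    simp only [tokRunScan]
    rw [if_neg hno]
  | cons x xs ih =>
    have hxle : ∀ y ∈ xs, x ≤ y := fun y hy => (List.pairwise_cons.1 hs).1 y hy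
    have hxs : xs.Pairwise (· ≤ ·) := (List.pairwise_cons.1 hs).2
    by_cases hxp : x = p
    · subst hxp
      rw [show tokRunScan (some x) run (x :: xs) dice
            = if 3 ≤ run + 1 then dice.sum else tokRunScan (some x) (run + 1) xs dice from by
            simp [tokRunScan]]
      by_cases h3 : 3 ≤ run + 1
      · have hcnt : 3 ≤ run + (x :: xs).count x ∨ ∃ z ∈ x :: xs, x < z ∧ 3 ≤ (x :: xs).count z := by
          left; rw [List.count_cons_self]; omega
        rw [if_pos h3, if_pos hcnt]
      · rw [if_neg h3, ih x (run + 1) hxs hxle (by omega)]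
        congr 1
        simp only [eq_iff_iff, List.mem_cons]
        constructor
        · rintro (h | ⟨y, hy, hlt, hc⟩)
          · left; rw [List.count_cons_self]; omega
          · right
            have hyne : y ≠ x := by omega
            refine ⟨y, Or.inr hy, hlt, ?_⟩
            rw [List.count_cons_of_ne (Ne.symm hyne)]; exact hc
        · rintro (h | ⟨y, hy, hlt, hc⟩)
          · left; rw [List.count_cons_self] at h; omega
          · rcases hy with rfl | hy
            · exact absurd hlt (lt_irrefl _)
            · right
              have hyne : y ≠ x := by omega
              rw [List.count_cons_of_ne (Ne.symm hyne)] at hc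
              exact ⟨y, hy, hlt, hc⟩
    · have hlt : p < x :=
        lt_of_le_of_ne (hge x List.mem_cons_self) (fun hpx => hxp hpx.symm)
      rw [show tokRunScan (some p) run (x :: xs) dice
            = if 3 ≤ (1 : Nat) then dice.sum else tokRunScan (some x) 1 xs dice from by
            simp [tokRunScan, hxp]]
      rw [if_neg (by omega : ¬ (3 : Nat) ≤ 1), ih x 1 hxs hxle (by omega)]
      have hpcnt : (x :: xs).count p = 0 := by
        rw [List.count_eq_zero]
        intro hmem
        rcases List.mem_cons.1 hmem with rfl | hmem
        · exact hxp rfl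
        · exact absurd (hxle p hmem) (by omega)
      congr 1
      simp only [eq_iff_iff, hpcnt, List.mem_cons]
      constructor
      · rintro (h | ⟨y, hy, hylt, hc⟩)
        · right
          refine ⟨x, Or.inl rfl, hlt, ?_⟩
          rw [List.count_cons_self]; omega
        · right
          have hyne : y ≠ x := by omega
          refine ⟨y, Or.inr hy, lt_trans hlt hylt, ?_⟩
          rw [List.count_cons_of_ne (Ne.symm hyne)]; exact hc
      · rintro (h | ⟨y, hy, hylt, hc⟩)
        · omega
        · rcases hy with rfl | hy
          · left; rw [List.count_cons_self] at hc; omega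
          · by_cases hyx : y = x
            · subst hyx
              left; rw [List.count_cons_self] at hc; omega
            · right
              have hxy : x < y := lt_of_le_of_ne (hxle y hy) (Ne.symm hyx)
              rw [List.count_cons_of_ne (Ne.symm hyx)] at hc
              exact ⟨y, hy, hxy, hc⟩

theorem three_of_kind_alt_eq (dice : List Int) :
    three_of_kind_alt dice = if ∃ x ∈ dice, 3 ≤ dice.count x then dice.sum else 0 := by
  unfold three_of_kind_alt
  have hperm : (PySem.List.sorted dice (fun x => x) false).Perm dice := PySem.List.sorted_perm ..
  have hpw : (PySem.List.sorted dice (fun x => x) false).Pairwise (· ≤ ·) := by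
    simpa using PySem.List.sorted_pairwise dice (fun x => x)
  rcases hsv : PySem.List.sorted dice (fun x => x) false with _ | ⟨h, t⟩
  · have : dice = [] := List.Perm.eq_nil (hsv ▸ hperm).symm
    subst this
    simp [tokRunScan]
  · rw [hsv] at hperm hpw
    have hpt : t.Pairwise (· ≤ ·) := (List.pairwise_cons.1 hpw).2
    have hht : ∀ y ∈ t, h ≤ y := fun y hy => (List.pairwise_cons.1 hpw).1 y hy
    have hcnt : ∀ v : Int, dice.count v = (h :: t).count v := fun v => (hperm.count_eq v).symm
    rw [show tokRunScan none 0 (h :: t) dice = tokRunScan (some h) 1 t dice from by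
          simp [tokRunScan]]
    rw [tokRunScan_some dice t h 1 hpt hht (by omega)]
    congr 1
    simp only [eq_iff_iff]
    constructor
    · rintro (h3 | ⟨y, hy, hylt, hc⟩)
      · refine ⟨h, hperm.mem_iff.1 List.mem_cons_self, ?_⟩
        rw [hcnt, List.count_cons_self]; omega
      · have hyne : y ≠ h := by omega
        refine ⟨y, hperm.mem_iff.1 (List.mem_cons_of_mem _ hy), ?_⟩
        rw [hcnt, List.count_cons_of_ne (Ne.symm hyne)]; exact hc
    · rintro ⟨x, hx, hc⟩
      rw [hcnt] at hc
      by_cases hxh : x = h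
      · subst hxh
        left; rw [List.count_cons_self] at hc; omega
      · right
        have hxm : x ∈ h :: t := hperm.mem_iff.2 hx
        rcases List.mem_cons.1 hxm with rfl | hxm
        · exact absurd rfl hxh
        · rw [List.count_cons_of_ne (Ne.symm hxh)] at hc
          exact ⟨x, hxm, lt_of_le_of_ne (hht x hxm) (Ne.symm hxh), hc⟩

-- ===== VERDICT (by name: the statement is the Claim_ definition above) =====
theorem three_of_kind_spec : Claim_equal_three_of_kind := by
  intro dice _
  unfold Spec_three_of_kind
  rw [three_of_kind_eq, three_of_kind_alt_eq]
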